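-- pv_equiv track=rewrite | github.com/NCBI-Hackathons/PSST | queriesWithVar.py | find_alignment_pos
-- ===== SOURCE A (Python) =====
-- def find_alignment_pos(pos,ref):
-- 	'''
-- 	find the position of the base of interest in the reference alignment.
-- 	Inputs
-- 	- (int) pos: the position of the base of interest in the reference sequence
-- 	- (str) ref: the reference alignment
-- 	Outputs
-- 	- (int) alignment_pos: the position in the reference alignment
-- 	'''
-- 	# find the position of the ref base in the reference alignment
-- 	alignment_pos = 0 # This will be the position of the ref base in the reference alignment
-- 	seq_pos = 0 # Keeps track of the current position in the reference sequence
-- 	while seq_pos < pos and alignment_pos < len(ref):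
-- 		current_base = ref[alignment_pos]
-- 		if current_base != "-":
-- 			seq_pos += 1
-- 		alignment_pos += 1
-- 	return alignment_pos
-- ===== SOURCE B (Python) =====
-- def find_alignment_pos(pos, ref):
--     # Build once: positions[k] = alignment index just past the (k+1)-th non-gap base,
--     # then answer by branch/lookup instead of a counting loop.
--     positions = [i + 1 for i, c in enumerate(ref) if c != '-']
--     if pos <= 0:
--         return 0
--     if pos <= len(positions):
--         return positions[pos - 1]
--     return len(ref)
-- ===== Notes on version B (the rewrite author's own statement) =====
-- stated objective: alternative
-- what changed: Replaces the counting while-loop with early exit by a build phase (index table of alignment positions of the non-gap bases via a comprehension) followed by a branch/lookup.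
import Mathlib
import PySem

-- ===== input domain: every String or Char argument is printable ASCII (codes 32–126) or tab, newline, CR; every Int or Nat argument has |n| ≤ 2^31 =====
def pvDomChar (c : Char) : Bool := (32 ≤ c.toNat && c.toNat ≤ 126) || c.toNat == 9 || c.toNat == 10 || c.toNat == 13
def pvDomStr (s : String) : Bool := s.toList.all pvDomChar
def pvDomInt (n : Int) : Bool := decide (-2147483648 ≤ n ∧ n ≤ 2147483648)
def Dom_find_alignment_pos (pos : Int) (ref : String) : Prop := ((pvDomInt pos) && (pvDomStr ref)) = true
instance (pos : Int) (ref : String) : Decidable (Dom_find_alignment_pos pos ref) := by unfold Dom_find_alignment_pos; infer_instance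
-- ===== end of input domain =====

-- B replaces A's counting while-loop (early exit) by building an index table of
-- alignment positions of the non-gap bases and answering with a branch/lookup.

-- ===== PORT A =====
-- the while loop: cs are the characters of ref not yet visited (alignment_pos < len(ref) ↔ cs ≠ [])
def pvALoop (pos : Int) (cs : List Char) (seq_pos alignment_pos : Int) : Int :=
  match cs with
  | [] => alignment_pos
  | c :: rest =>
      if seq_pos < pos then
        pvALoop pos rest (if c ≠ '-' then seq_pos + 1 else seq_pos) (alignment_pos + 1)
      else alignment_pos

def find_alignment_pos (pos : Int) (ref : String) : Int :=
  pvALoop pos ref.toList 0 0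

-- ===== PORT B =====
-- positions = [i + 1 for i, c in enumerate(ref) if c != '-']
def pvPositions (cs : List Char) : List Int :=
  (PySem.List.enumerate cs).filterMap (fun p => if p.2 ≠ '-' then some (p.1 + 1) else none)

def pvLookup (pos : Int) (cs : List Char) : Int :=
  let positions := pvPositions cs
  if pos ≤ 0 then 0
  else if pos ≤ (positions.length : Int) then (PySem.List.pyGet? positions (pos - 1)).getD 0  -- positions[pos-1], proven in range
  else (cs.length : Int)

def find_alignment_pos_alt (pos : Int) (ref : String) : Int :=
  pvLookup pos ref.toList

-- ===== PRECONDITION & SPEC =====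
def Spec_find_alignment_pos (pos : Int) (ref : String) (out : Int) : Prop := out = find_alignment_pos_alt pos ref
instance (pos : Int) (ref : String) (out : Int) : Decidable (Spec_find_alignment_pos pos ref out) := by unfold Spec_find_alignment_pos; infer_instance

-- ===== CLAIM (what is proved, stated in full; the proofs are below) =====
def Claim_equal_find_alignment_pos : Prop := ∀ (pos : Int) (ref : String), Dom_find_alignment_pos pos ref → Spec_find_alignment_pos pos ref (find_alignment_pos pos ref)

-- ===== LEMMAS AND PROOFS =====

theorem pv_enum_shift (cs : List Char) (s : Int) :
    PySem.List.enumerate cs (s + 1) = (PySem.List.enumerate cs s).map (fun p => (p.1 + 1, p.2)) := by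
  induction cs generalizing s with
  | nil => simp [PySem.List.enumerate_nil]
  | cons c rest ih => simp [PySem.List.enumerate_cons, ih (s + 1)]

theorem pv_positions_cons (c : Char) (cs : List Char) :
    pvPositions (c :: cs) =
      (if c ≠ '-' then [(1 : Int)] else []) ++ (pvPositions cs).map (· + 1) := by
  unfold pvPositions
  rw [show (0 : Int) = 0 from rfl, PySem.List.enumerate_cons]
  rw [show (0 : Int) + 1 = 0 + 1 from rfl, pv_enum_shift cs 0]
  simp only [List.filterMap_cons, List.filterMap_map, List.map_filterMap]
  by_cases h : c = '-' <;> simp [h, Function.comp] <;>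
    (congr 1; funext p; by_cases hp : p.2 = '-' <;> simp [hp, add_comm, add_left_comm])

theorem pv_lookup_nil (pos : Int) : pvLookup pos [] = 0 := by
  unfold pvLookup pvPositions
  simp [PySem.List.enumerate_nil]
  omega

theorem pv_lookup_nonpos (pos : Int) (cs : List Char) (h : pos ≤ 0) : pvLookup pos cs = 0 := by
  unfold pvLookup; rw [if_pos h]

theorem pv_lookup_mid (pos : Int) (cs : List Char) (h : 0 < pos)
    (hle : pos ≤ ((pvPositions cs).length : Int)) :
    pvLookup pos cs = (PySem.List.pyGet? (pvPositions cs) (pos - 1)).getD 0 := by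
  unfold pvLookup; rw [if_neg (by omega), if_pos hle]

theorem pv_lookup_big (pos : Int) (cs : List Char) (h : 0 < pos)
    (hgt : ((pvPositions cs).length : Int) < pos) :
    pvLookup pos cs = (cs.length : Int) := by
  unfold pvLookup; rw [if_neg (by omega), if_neg (by omega)]

theorem pv_get_map (P : List Int) (i : Int) (h0 : 0 ≤ i) (h1 : i < (P.length : Int)) :
    (PySem.List.pyGet? (P.map (· + 1)) i).getD 0 = (PySem.List.pyGet? P i).getD 0 + 1 := by
  have hk : i.toNat < P.length := by omega
  rw [show i = ((i.toNat : Nat) : Int) from (Int.toNat_of_nonneg h0).symm,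
    PySem.List.pyGet?_natCast, PySem.List.pyGet?_natCast,
    List.getElem?_map, List.getElem?_eq_getElem hk]
  simp

theorem pv_lookup_cons (pos : Int) (c : Char) (cs : List Char) (h : 0 < pos) :
    pvLookup pos (c :: cs) = 1 + pvLookup (pos - (if c ≠ '-' then 1 else 0)) cs := by
  have hP := pv_positions_cons c cs
  by_cases hc : c = '-'
  · simp only [hc, ne_eq, not_true_eq_false, if_false, List.nil_append] at hP ⊢
    rw [sub_zero]
    by_cases hle : pos ≤ ((pvPositions cs).length : Int)
    · rw [pv_lookup_mid pos ('-' :: cs) h (by rw [hP]; simpa using hle),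
        pv_lookup_mid pos cs h hle, hP, pv_get_map _ _ (by omega) (by omega)]
      ring
    · rw [pv_lookup_big pos ('-' :: cs) h (by rw [hP]; simpa using hle),
        pv_lookup_big pos cs h (by omega)]
      simp only [List.length_cons]; push_cast; ring
  · simp only [ne_eq, hc, not_false_eq_true, if_true] at hP ⊢
    have hlen : ((pvPositions (c :: cs)).length : Int) = ((pvPositions cs).length : Int) + 1 := by
      rw [hP]; simp
    by_cases h1 : pos = 1
    · subst h1
      rw [pv_lookup_mid 1 (c :: cs) (by omega) (by omega),
        pv_lookup_nonpos (1 - 1) cs (by omega), hP]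
      norm_num [PySem.List.pyGet?_zero_cons]
    · have h2 : 2 ≤ pos := by omega
      by_cases hle : pos ≤ ((pvPositions cs).length : Int) + 1
      · rw [pv_lookup_mid pos (c :: cs) h (by omega),
          pv_lookup_mid (pos - 1) cs (by omega) (by omega), hP]
        rw [show pos - 1 = ((((pos - 2).toNat : Nat) : Int) + 1) from by omega]
        rw [List.singleton_append, PySem.List.pyGet?_cons_succ]
        rw [pv_get_map _ _ (by omega) (by omega)]
        rw [show (((pos - 2).toNat : Nat) : Int) = pos - 1 - 1 from by omega]
        ring
      · rw [pv_lookup_big pos (c :: cs) h (by omega),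
          pv_lookup_big (pos - 1) cs (by omega) (by omega)]
        simp only [List.length_cons]; push_cast; ring

theorem pv_aloop_shift (cs : List Char) (pos seq ap : Int) :
    pvALoop pos cs seq ap = ap + pvALoop (pos - seq) cs 0 0 := by
  induction cs generalizing pos seq ap with
  | nil => simp [pvALoop]
  | cons c rest ih =>
    by_cases h : seq < pos
    · by_cases hc : c = '-'
      · simp only [pvALoop, hc]
        rw [if_pos h, if_pos (show (0:Int) < pos - seq by omega)]
        simp only [ne_eq, not_true_eq_false, if_false]
        rw [ih pos seq (ap + 1), ih (pos - seq) 0 (0 + 1)]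
        simp only [sub_zero]
        ring
      · simp only [pvALoop]
        rw [if_pos h, if_pos (show (0:Int) < pos - seq by omega)]
        simp only [ne_eq, hc, not_false_eq_true, if_true]
        rw [ih pos (seq + 1) (ap + 1), ih (pos - seq) (0 + 1) (0 + 1)]
        rw [show pos - (seq + 1) = pos - seq - (0 + 1) by ring]
        ring
    · simp only [pvALoop]
      rw [if_neg h, if_neg (show ¬ (0:Int) < pos - seq by omega)]
      ring

theorem pv_main (cs : List Char) (pos : Int) : pvALoop pos cs 0 0 = pvLookup pos cs := by
  induction cs generalizing pos with
  | nil => simp [pvALoop, pv_lookup_nil]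
  | cons c rest ih =>
    by_cases h : 0 < pos
    · rw [pv_lookup_cons pos c rest h]
      simp only [pvALoop, if_pos h]
      rw [pv_aloop_shift, ih]
      by_cases hc : c = '-' <;> simp [hc]
    · simp only [pvALoop, if_neg (by omega : ¬ (0:Int) < pos)]
      unfold pvLookup
      simp only [if_pos (by omega : pos ≤ 0)]

-- ===== VERDICT (by name: the statement is the Claim_ definition above) =====
theorem find_alignment_pos_spec : Claim_equal_find_alignment_pos := by
  intro pos ref _
  unfold Spec_find_alignment_pos find_alignment_pos find_alignment_pos_alt
  exact pv_main ref.toList pos
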